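-- pv_equiv track=rewrite | github.com/bruised-ego-labs/Nancy | archive/baseline_implementations.py | _extract_wiki_snippet
-- ===== SOURCE A (Python) =====
-- from typing import Dict, List, Any, Optional
--
-- def _extract_wiki_snippet(content: str, query_words: List[str], snippet_length: int = 250) -> str:
--     """Extract wiki-style snippet with highlighted terms"""
--     content_lower = content.lower()
--
--     # Find best match location
--     best_pos = 0
--     max_matches = 0
--
--     # Sliding window to find area with most query word matches
--     window_size = snippet_length
--     for i in range(0, max(1, len(content) - window_size), 50):
--         window = content_lower[i:i + window_size]
--         matches = sum(1 for word in query_words if word in window)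
--         if matches > max_matches:
--             max_matches = matches
--             best_pos = i
--
--     # Extract snippet
--     start = max(0, best_pos)
--     end = min(len(content), start + snippet_length)
--     snippet = content[start:end]
--
--     if start > 0:
--         snippet = "..." + snippet
--     if end < len(content):
--         snippet = snippet + "..."
--
--     return snippet
-- ===== SOURCE B (Python) =====
-- from typing import List
--
--
-- def _extract_wiki_snippet(content: str, query_words: List[str], snippet_length: int = 250) -> str:
--     """Extract wiki-style snippet with highlighted terms (occurrence-index sweep)."""
--     content_lower = content.lower()
--     n = len(content)
--     starts = list(range(0, max(1, n - snippet_length), 50))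
--
--     # counts[j] = number of query words present in the window starting at starts[j]
--     counts = [0] * len(starts)
--     for word in query_words:
--         if not word:
--             counts = [c + 1 for c in counts]  # the empty word matches every window
--             continue
--         # all occurrence positions of word in content_lower, ascending
--         occ = [p for p in range(n) if content_lower.startswith(word, p)]
--         # one merge-sweep over (occ, starts): the window at i contains word iff the
--         # first occurrence p >= i still fits before the window end i + snippet_length
--         marks = []
--         k = 0
--         for i in starts:
--             while k < len(occ) and occ[k] < i:
--                 k += 1
--             marks.append(1 if k < len(occ) and occ[k] + len(word) <= i + snippet_length else 0)
--         counts = [c + m for c, m in zip(counts, marks)]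
--
--     best_pos = 0
--     max_matches = 0
--     for i, c in zip(starts, counts):
--         if c > max_matches:
--             max_matches = c
--             best_pos = i
--
--     start = max(0, best_pos)
--     end = min(n, start + snippet_length)
--     snippet = content[start:end]
--     if start > 0:
--         snippet = "..." + snippet
--     if end < n:
--         snippet = snippet + "..."
--     return snippet
-- ===== Notes on version B (the rewrite author's own statement) =====
-- stated objective: alternative
-- what changed: Instead of re-scanning each 50-step window with per-word substring searches, B precomputes each word's occurrence positions once and does a single merge-sweep of those sorted positions against the window starts, accumulating per-window counts and picking the first maximum; Pre_ requires a nonnegative snippet_length, since for negative lengths A's windows arise from Python's negative slice-end wraparound, an unspecified corner neither value is right for.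
import Mathlib
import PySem

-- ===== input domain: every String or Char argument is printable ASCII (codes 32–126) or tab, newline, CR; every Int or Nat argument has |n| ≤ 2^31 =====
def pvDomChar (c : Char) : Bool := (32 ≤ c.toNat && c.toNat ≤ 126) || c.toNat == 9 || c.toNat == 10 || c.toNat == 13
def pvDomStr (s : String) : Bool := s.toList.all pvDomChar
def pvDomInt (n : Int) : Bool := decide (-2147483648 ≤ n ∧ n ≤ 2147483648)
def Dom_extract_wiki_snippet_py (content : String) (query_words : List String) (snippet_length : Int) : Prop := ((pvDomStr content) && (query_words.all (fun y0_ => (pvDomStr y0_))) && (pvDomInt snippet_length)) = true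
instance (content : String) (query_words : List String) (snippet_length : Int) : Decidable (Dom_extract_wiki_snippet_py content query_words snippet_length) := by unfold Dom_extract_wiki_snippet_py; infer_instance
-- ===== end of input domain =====

-- B replaces A's per-window substring rescans by one occurrence index per word, merged
-- once against the ascending window starts (objective: alternative algorithm; no speed claim).

-- ===== PORT A =====
-- literal port of _extract_wiki_snippet (Source A); strings handled as List Char via PySem
def extract_wiki_snippet_py (content : String) (query_words : List String) (snippet_length : Int) : String :=
  let content_lower : List Char := PySem.Chars.lower content.toList
  let n : Int := (content.toList.length : Int)
  -- for i in range(0, max(1, len(content) - window_size), 50): …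
  let bm : Int × Int :=
    (PySem.List.pyRange 0 (max 1 (n - snippet_length)) 50).foldl
      (fun (bm : Int × Int) (i : Int) =>
        let window := PySem.List.slice content_lower (some i) (some (i + snippet_length))
        let matches_ : Int :=
          (query_words.map (fun word => if PySem.Chars.isIn word.toList window then (1 : Int) else 0)).sum
        if matches_ > bm.2 then (i, matches_) else bm)
      (0, 0)
  let start : Int := max 0 bm.1
  let end_ : Int := min n (start + snippet_length)
  let snippet : List Char := PySem.List.slice content.toList (some start) (some end_)
  let snippet : List Char := if start > 0 then "...".toList ++ snippet else snippet
  let snippet : List Char := if end_ < n then snippet ++ "...".toList else snippet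
  String.ofList snippet

-- ===== PORT B =====
-- port of B's per-word merge-sweep; the pointer k into occ becomes the remaining suffix of occ,
-- marks.append becomes an accumulator (reversed at the end)
def pvSweep (n wlen L : Int) : List Int → List Int → List Int → List Int
  | _, [], acc => acc.reverse
  | occ, i :: rest, acc =>
      let occ' := occ.dropWhile (fun p => p < i)
      pvSweep n wlen L occ' rest
        ((match occ' with
          | [] => (0 : Int)
          | p :: _ => if p + wlen ≤ i + L then (1 : Int) else 0) :: acc)

-- port of _extract_wiki_snippet (Source B)
def extract_wiki_snippet_py_alt (content : String) (query_words : List String) (snippet_length : Int) : String :=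
  let content_lower : List Char := PySem.Chars.lower content.toList
  let n : Int := (content.toList.length : Int)
  let starts : List Int := PySem.List.pyRange 0 (max 1 (n - snippet_length)) 50
  let counts : List Int :=
    query_words.foldl
      (fun (counts : List Int) (word : String) =>
        if word.toList = [] then counts.map (· + 1)
        else
          -- content_lower.startswith(word, p) for 0 ≤ p < n is exactly startswith on drop p
          let occ : List Int :=
            (PySem.List.pyRange 0 n 1).filter
              (fun p => PySem.Chars.startswith (content_lower.drop p.toNat) word.toList)
          let marks : List Int := pvSweep n (word.toList.length : Int) snippet_length occ starts []
          List.zipWith (fun c m => c + m) counts marks)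
      (List.replicate starts.length (0 : Int))
  let bm : Int × Int :=
    (starts.zip counts).foldl
      (fun (bm : Int × Int) (ic : Int × Int) => if ic.2 > bm.2 then (ic.1, ic.2) else bm)
      (0, 0)
  let start : Int := max 0 bm.1
  let end_ : Int := min n (start + snippet_length)
  let snippet : List Char := PySem.List.slice content.toList (some start) (some end_)
  let snippet : List Char := if start > 0 then "...".toList ++ snippet else snippet
  let snippet : List Char := if end_ < n then snippet ++ "...".toList else snippet
  String.ofList snippet

-- ===== PRECONDITION & SPEC =====
-- Pre_ excludes negative snippet_length: there A's windows come from Python's negative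
-- slice-end wraparound, an unspecified corner on which neither program's value is the
-- specified one (A still returns a string there; B naturally treats such windows as empty).
def Pre_extract_wiki_snippet_py (content : String) (query_words : List String) (snippet_length : Int) : Prop :=
  0 ≤ snippet_length
instance (content : String) (query_words : List String) (snippet_length : Int) : Decidable (Pre_extract_wiki_snippet_py content query_words snippet_length) := by unfold Pre_extract_wiki_snippet_py; infer_instance

def pvWitness_extract_wiki_snippet_py : String × List String × Int := ("hello world", ["world"], 5)

def Spec_extract_wiki_snippet_py (content : String) (query_words : List String) (snippet_length : Int) (out : String) : Prop := out = extract_wiki_snippet_py_alt content query_words snippet_length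
instance (content : String) (query_words : List String) (snippet_length : Int) (out : String) : Decidable (Spec_extract_wiki_snippet_py content query_words snippet_length out) := by unfold Spec_extract_wiki_snippet_py; infer_instance

-- ===== CLAIM (what is proved, stated in full; the proofs are below) =====
def Claim_equal_extract_wiki_snippet_py : Prop := ∀ (content : String) (query_words : List String) (snippet_length : Int), Dom_extract_wiki_snippet_py content query_words snippet_length → Pre_extract_wiki_snippet_py content query_words snippet_length → Spec_extract_wiki_snippet_py content query_words snippet_length (extract_wiki_snippet_py content query_words snippet_length)

-- ===== LEMMAS AND PROOFS =====

-- the indicator A sums per window: is the word present in the window starting at i?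
def pvInd (cl : List Char) (L : Int) (w : String) (i : Int) : Int :=
  if PySem.Chars.isIn w.toList (PySem.List.slice cl (some i) (some (i + L))) then 1 else 0

-- dropWhile (< j) after dropWhile (< i) collapses when i ≤ j
lemma pvDropWhile_dropWhile (occ : List Int) (i j : Int) (h : i ≤ j) :
    (occ.dropWhile (fun p => p < i)).dropWhile (fun p => p < j) = occ.dropWhile (fun p => p < j) := by
  induction occ with
  | nil => simp
  | cons p rest ih =>
      by_cases hp : p < i
      · have hpj : p < j := lt_of_lt_of_le hp h
        simp [hp, hpj, ih]
      · simp [hp]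

-- the sweep is the pointwise head-check on monotone window starts
lemma pvSweep_eq_map (n wlen L : Int) (occ starts acc : List Int)
    (hs : starts.Pairwise (· ≤ ·)) :
    pvSweep n wlen L occ starts acc =
      acc.reverse ++ starts.map (fun i =>
        match occ.dropWhile (fun p => p < i) with
        | [] => (0 : Int)
        | p :: _ => if p + wlen ≤ i + L then (1 : Int) else 0) := by
  induction starts generalizing occ acc with
  | nil => simp [pvSweep]
  | cons i rest ih =>
      rw [List.pairwise_cons] at hs
      rw [pvSweep, ih _ _ hs.2]
      simp only [List.map_cons, List.reverse_cons, List.append_assoc, List.singleton_append]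
      refine congrArg₂ _ rfl (congrArg₂ _ rfl ?_)
      exact List.map_congr_left (fun j hj => by rw [pvDropWhile_dropWhile _ _ _ (hs.1 j hj)])

-- an element not below i survives dropWhile (< i)
lemma pvMem_dropWhile (occ : List Int) (i p : Int) (hp : p ∈ occ) (hip : i ≤ p) :
    p ∈ occ.dropWhile (fun q => q < i) := by
  induction occ with
  | nil => simp at hp
  | cons q rest ih =>
      by_cases hq : q < i
      · simp [hq]
        rcases List.mem_cons.1 hp with rfl | hpr
        · omega
        · exact ih hpr
      · simpa [List.dropWhile_cons, hq] using hp

-- head-check of the sorted occurrence list is the existential criterion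
lemma pvHeadCheck (occ : List Int) (hocc : occ.Pairwise (· ≤ ·)) (i wlen stop : Int) :
    (match occ.dropWhile (fun p => p < i) with
     | [] => (0 : Int)
     | p :: _ => if p + wlen ≤ stop then (1 : Int) else 0) =
      (if ∃ p ∈ occ, i ≤ p ∧ p + wlen ≤ stop then (1 : Int) else 0) := by
  rcases h : occ.dropWhile (fun p => p < i) with _ | ⟨p0, r⟩
  · rw [if_neg]
    rintro ⟨p, hp, hip, _⟩
    have := pvMem_dropWhile occ i p hp hip
    simp [h] at this
  · have hsuf : (occ.dropWhile (fun p => p < i)).Sublist occ := List.dropWhile_sublist _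
    have hp0mem : p0 ∈ occ := hsuf.subset (h ▸ List.mem_cons_self ..)
    have hp0i : i ≤ p0 := by
      have := List.head?_dropWhile_not (p := fun p : Int => p < i) (l := occ)
      rw [h] at this; simp at this; omega
    have hpw : (p0 :: r).Pairwise (· ≤ ·) := h ▸ hocc.sublist hsuf
    have hmin : ∀ p ∈ occ, i ≤ p → p0 ≤ p := by
      intro p hp hip
      have hpd := pvMem_dropWhile occ i p hp hip
      rw [h] at hpd
      rcases List.mem_cons.1 hpd with rfl | hpr
      · rfl
      · exact (List.pairwise_cons.1 hpw).1 p hpr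
    by_cases hfit : p0 + wlen ≤ stop
    · simp only [hfit, if_true]
      rw [if_pos ⟨p0, hp0mem, hp0i, hfit⟩]
    · simp only [hfit, if_false]
      rw [if_neg]
      rintro ⟨p, hp, hip, hpfit⟩
      exact hfit (by have := hmin p hp hip; omega)

-- the existential occurrence criterion is exactly membership in the sliced window
-- (an occurrence always fits inside the text, so 'before i + L' = 'before the slice end')
lemma pvCrit_iff_isIn (cl : List Char) (w : String) (hw : w.toList ≠ []) (L i : Int)
    (hi : 0 ≤ i) (hL : 0 ≤ L) :
    (∃ p ∈ (PySem.List.pyRange 0 ((cl.length : Nat) : Int) 1).filter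
        (fun p => PySem.Chars.startswith (cl.drop p.toNat) w.toList),
        i ≤ p ∧ p + (w.toList.length : Int) ≤ i + L) ↔
      PySem.Chars.isIn w.toList (PySem.List.slice cl (some i) (some (i + L))) = true := by
  set stop : Int := min ((cl.length : Nat) : Int) (i + L) with hstop
  have hfacts : 0 ≤ stop ∧ stop ≤ ((cl.length : Nat) : Int) ∧
      stop.toNat = PySem.List.clampIdx cl.length (i + L) := by
    simp only [hstop, PySem.List.clampIdx]
    split_ifs <;> omega
  obtain ⟨hst0, hstn, hstS⟩ := hfacts
  have hwin : PySem.List.slice cl (some i) (some (i + L)) =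
      (cl.drop (PySem.List.clampIdx cl.length i)).take (stop.toNat - PySem.List.clampIdx cl.length i) := by
    simp only [PySem.List.slice, hstS]
  rw [hwin, ← PySem.Chars.exists_prefix_drop_iff_isIn]
  set A := PySem.List.clampIdx cl.length i with hA
  have hAdef : A = min i.toNat cl.length := by
    simp only [hA, PySem.List.clampIdx]; split_ifs <;> omega
  constructor
  · rintro ⟨p, hp, hip, hfit⟩
    rw [List.mem_filter] at hp
    obtain ⟨hpr, hpsw⟩ := hp
    rw [PySem.List.mem_pyRange_iff_of_pos (by norm_num)] at hpr
    have hpref : w.toList <+: cl.drop p.toNat := by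
      simpa [PySem.Chars.startswith, List.isPrefixOf_iff_prefix] using hpsw
    have hlen := hpref.length_le
    simp [List.length_drop] at hlen
    have hww : w.toList.length = w.length := by simp
    -- the occurrence lies inside the text, so it fits before the clamped slice end too
    have hfit' : p + (w.toList.length : Int) ≤ stop := by rw [hstop]; omega
    refine ⟨p.toNat - A, ?_⟩
    rw [List.drop_take, List.prefix_take_iff, List.drop_drop]
    have hiA : A = i.toNat := by omega
    constructor
    · have : A + (p.toNat - A) = p.toNat := by omega
      rw [this]; exact hpref
    · omega
  · rintro ⟨j, hj⟩
    rw [List.drop_take, List.prefix_take_iff, List.drop_drop] at hj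
    obtain ⟨hpref, hjlen⟩ := hj
    have hwlen : 0 < w.toList.length := List.length_pos_iff.2 hw
    have hlen := hpref.length_le
    simp [List.length_drop] at hlen
    refine ⟨((A + j : Nat) : Int), ?_, by omega, ?_⟩
    · rw [List.mem_filter]
      constructor
      · rw [PySem.List.mem_pyRange_iff_of_pos (by norm_num)]
        exact ⟨by positivity, by omega, by simp⟩
      · simpa [PySem.Chars.startswith, List.isPrefixOf_iff_prefix] using hpref
    · omega

lemma pvZipWith_map (starts : List Int) (f g : Int → Int) :
    List.zipWith (fun c m => c + m) (starts.map f) (starts.map g) = starts.map (fun i => f i + g i) := by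
  induction starts with
  | nil => rfl
  | cons i rest ih => simp [ih]

-- the occurrence list is ascending
lemma pvOcc_sorted (cl : List Char) (w : String) :
    ((PySem.List.pyRange 0 ((cl.length : Nat) : Int) 1).filter
        (fun p => PySem.Chars.startswith (cl.drop p.toNat) w.toList)).Pairwise (· ≤ ·) := by
  apply List.Pairwise.filter
  rw [PySem.List.pyRange_of_pos _ _ (by norm_num)]
  refine List.pairwise_map.2 ?_
  exact (List.pairwise_lt_range).imp (by intro a b h; omega)

-- B's marks for a nonempty word are A's per-window indicator
lemma pvMarks_eq (cl : List Char) (L : Int) (hL : 0 ≤ L) (starts : List Int)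
    (hs : starts.Pairwise (· ≤ ·)) (hmem : ∀ i ∈ starts, 0 ≤ i)
    (w : String) (hw : w.toList ≠ []) :
    pvSweep ((cl.length : Nat) : Int) (w.toList.length : Int) L
        ((PySem.List.pyRange 0 ((cl.length : Nat) : Int) 1).filter
          (fun p => PySem.Chars.startswith (cl.drop p.toNat) w.toList)) starts []
      = starts.map (fun i => pvInd cl L w i) := by
  rw [pvSweep_eq_map _ _ _ _ _ _ hs, List.reverse_nil, List.nil_append]
  refine List.map_congr_left (fun i hi => ?_)
  rw [pvHeadCheck _ (pvOcc_sorted cl w) i, pvInd]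
  by_cases hcrit : PySem.Chars.isIn w.toList (PySem.List.slice cl (some i) (some (i + L))) = true
  · rw [if_pos ((pvCrit_iff_isIn cl w hw L i (hmem i hi) hL).2 hcrit), if_pos hcrit]
  · rw [if_neg (fun hex => hcrit ((pvCrit_iff_isIn cl w hw L i (hmem i hi) hL).1 hex)), if_neg hcrit]

-- the counts fold computes A's per-window sums
lemma pvCounts_eq (cl : List Char) (L : Int) (hL : 0 ≤ L) (starts : List Int)
    (hs : starts.Pairwise (· ≤ ·)) (hmem : ∀ i ∈ starts, 0 ≤ i) :
    ∀ (ws : List String) (f : Int → Int),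
      ws.foldl
        (fun (counts : List Int) (word : String) =>
          if word.toList = [] then counts.map (· + 1)
          else
            let occ : List Int :=
              (PySem.List.pyRange 0 ((cl.length : Nat) : Int) 1).filter
                (fun p => PySem.Chars.startswith (cl.drop p.toNat) word.toList)
            let marks : List Int := pvSweep ((cl.length : Nat) : Int) (word.toList.length : Int) L occ starts []
            List.zipWith (fun c m => c + m) counts marks)
        (starts.map f)
      = starts.map (fun i => f i + (ws.map (fun w => pvInd cl L w i)).sum) := by
  intro ws
  induction ws with
  | nil => intro f; simp
  | cons w ws ih =>
      intro f
      rw [List.foldl_cons]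
      by_cases hw : w.toList = []
      · simp only [hw, if_true, List.map_map]
        rw [ih]
        refine List.map_congr_left (fun i _ => ?_)
        have : pvInd cl L w i = 1 := by
          simp [pvInd, hw, PySem.Chars.isIn_nil]
        simp [this]; ring
      · simp only [hw, if_false]
        rw [pvMarks_eq cl L hL starts hs hmem w hw, pvZipWith_map, ih]
        refine List.map_congr_left (fun i _ => ?_)
        simp; ring

-- folding the zipped (start, count) pairs is folding the starts with the count function
lemma pvZipFold (starts : List Int) (f : Int → Int) (bm : Int × Int) :
    ((starts.zip (starts.map f)).foldl
        (fun (bm : Int × Int) (ic : Int × Int) => if ic.2 > bm.2 then (ic.1, ic.2) else bm) bm) =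
      starts.foldl (fun (bm : Int × Int) (i : Int) => if f i > bm.2 then (i, f i) else bm) bm := by
  induction starts generalizing bm with
  | nil => rfl
  | cons i rest ih => simp [List.zip_cons_cons, List.foldl_cons, ih]

-- the two ports agree on every input with a nonnegative snippet length
lemma pvMain (content : String) (query_words : List String) (L : Int) (hL : 0 ≤ L) :
    extract_wiki_snippet_py content query_words L = extract_wiki_snippet_py_alt content query_words L := by
  unfold extract_wiki_snippet_py extract_wiki_snippet_py_alt
  dsimp only
  have hlen : (PySem.Chars.lower content.toList).length = content.toList.length := by
    simp [PySem.Chars.lower]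
  rw [← hlen]
  set cl := PySem.Chars.lower content.toList with hcl
  set starts := PySem.List.pyRange 0 (max 1 (((cl.length : Nat) : Int) - L)) 50 with hstarts
  have hs : starts.Pairwise (· ≤ ·) := by
    rw [hstarts, PySem.List.pyRange_of_pos _ _ (by norm_num : (0:Int) < 50)]
    refine List.pairwise_map.2 (List.pairwise_lt_range.imp ?_)
    intro a b h; omega
  have hmem : ∀ i ∈ starts, 0 ≤ i := by
    intro i hi
    rw [hstarts, PySem.List.mem_pyRange_iff_of_pos (by norm_num : (0:Int) < 50)] at hi
    exact hi.1
  have hrep : List.replicate starts.length (0 : Int) = starts.map (fun _ => (0 : Int)) := by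
    simp
  rw [hrep, pvCounts_eq cl L hL starts hs hmem query_words (fun _ => 0)]
  have hmap : (starts.map fun i => (0 : Int) + (query_words.map (fun w => pvInd cl L w i)).sum)
      = starts.map (fun i => (query_words.map (fun w => pvInd cl L w i)).sum) := by
    simp
  rw [hmap, pvZipFold]
  rfl

-- ===== VERDICT (by name: the statement is the Claim_ definition above) =====
theorem extract_wiki_snippet_py_spec : Claim_equal_extract_wiki_snippet_py := by
  intro content query_words snippet_length _ hpre
  unfold Spec_extract_wiki_snippet_py
  exact pvMain content query_words snippet_length hpre
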